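-- pv_equiv track=rewrite | github.com/nedthedev/AdventOfCode | 2015/Day19/main.py | replace_nth_occurence
-- ===== SOURCE A (Python) =====
-- def replace_nth_occurence(find, replace, string, n, match_case=True):
-- 	i = 0
-- 	found = 0
-- 	discovered = False
-- 	while(i < len(string)-len(find)+1):
-- 		discovered = False
-- 		if(match_case):
-- 			if(string[i:i+len(find)] == find):
-- 				discovered = True
-- 		else:
-- 			if(string[i:i+len(find)].lower() == find.lower()):
-- 				discovered = True
-- 		if(discovered):
-- 			found += 1
-- 			if(found == n):
-- 				return (string[:i] + replace + string[i+len(find):])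
-- 			i += len(find)
-- 		else:
-- 			i+=1
-- 	return None
-- ===== SOURCE B (Python) =====
-- def replace_nth_occurence(find, replace, string, n, match_case=True):
-- 	hay = string if match_case else string.lower()
-- 	ndl = find if match_case else find.lower()
-- 	parts = hay.split(ndl)
-- 	if n < 1 or n > len(parts) - 1:
-- 		return None
-- 	p = sum(map(len, parts[:n])) + (n - 1) * len(ndl)
-- 	return string[:p] + replace + string[p + len(find):]
-- ===== Notes on version B (the rewrite author's own statement) =====
-- stated objective: alternative
-- what changed: B replaces A's counting scan with a staged split-and-arithmetic computation: it splits the (once-lowercased when match_case=False) haystack on the needle, checks n against the part count, and reconstructs the nth occurrence's position as the sum of the first n part lengths plus (n-1) needle lengths.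
-- outside the precondition, e.g. on replace_nth_occurence('', 'X', 'ab', 1, True): A returns 'Xab', B raises ValueError; on replace_nth_occurence('', 'X', 'ab', 0, True): A does not finish within the time limit, B raises ValueError
import Mathlib
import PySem

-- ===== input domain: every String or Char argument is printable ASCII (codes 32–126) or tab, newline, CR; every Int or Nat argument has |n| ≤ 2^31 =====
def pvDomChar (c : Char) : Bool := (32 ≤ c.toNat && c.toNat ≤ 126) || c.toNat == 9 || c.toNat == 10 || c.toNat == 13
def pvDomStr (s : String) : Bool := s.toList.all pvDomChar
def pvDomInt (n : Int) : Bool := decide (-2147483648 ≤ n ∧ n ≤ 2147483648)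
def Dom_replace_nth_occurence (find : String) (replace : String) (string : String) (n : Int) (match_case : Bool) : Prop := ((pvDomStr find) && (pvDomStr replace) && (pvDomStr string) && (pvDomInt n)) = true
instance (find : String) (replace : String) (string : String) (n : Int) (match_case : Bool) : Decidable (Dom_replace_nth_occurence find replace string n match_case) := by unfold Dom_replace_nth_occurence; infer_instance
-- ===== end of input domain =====

-- B replaces A's counting scan by a staged computation: split the (optionally lowercased)
-- haystack on the needle, check n against the part count, and recover the splice position
-- by arithmetic on the part lengths; objective: alternative.


-- ===== PORT A =====
-- A's while loop; `fuel` bounds the number of iterations: string.length + n.toNat + 1 suffices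
-- whenever the Python loop terminates (each step advances i by ≥ 1, except with empty `find`,
-- where `found` grows by 1 per step and A returns once found = n).
def pvA_loop (f r s : List Char) (n : Int) (mc : Bool) : Nat → Int → Int → Option String
  | 0, _, _ => none
  | fuel+1, i, found =>
    if i < (s.length : Int) - (f.length : Int) + 1 then
      let discovered : Bool :=
        if mc then
          decide (PySem.List.slice s (some i) (some (i + (f.length : Int))) = f)
        else
          decide (PySem.Chars.lower (PySem.List.slice s (some i) (some (i + (f.length : Int)))) = PySem.Chars.lower f)
      if discovered then
        let found' := found + 1
        if found' = n then
          some (String.ofList (PySem.List.slice s none (some i) ++ r ++ PySem.List.slice s (some (i + (f.length : Int))) none))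
        else pvA_loop f r s n mc fuel (i + (f.length : Int)) found'
      else pvA_loop f r s n mc fuel (i + 1) found
    else none

def replace_nth_occurence (find : String) (replace : String) (string : String) (n : Int) (match_case : Bool) : Option String :=
  pvA_loop find.toList replace.toList string.toList n match_case (string.toList.length + n.toNat + 1) 0 0

-- ===== PORT B =====
-- Source B: split the (lowercased when match_case=False) haystack on the needle; the nth
-- occurrence exists iff 1 ≤ n ≤ len(parts)-1, and its position is then the sum of the
-- lengths of the first n parts plus (n-1) copies of the needle.
-- hay.split(ndl) raises ValueError for ndl = '' — those inputs are outside Pre_.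
def replace_nth_occurence_alt (find : String) (replace : String) (string : String) (n : Int) (match_case : Bool) : Option String :=
  let hay := if match_case then string.toList else PySem.Chars.lower string.toList
  let ndl := if match_case then find.toList else PySem.Chars.lower find.toList
  let parts := PySem.Chars.splitOn hay ndl
  if n < 1 ∨ n > (parts.length : Int) - 1 then none
  else
    let p : Int := ((PySem.List.slice parts none (some n)).map (fun q => (q.length : Int))).sum
                     + (n - 1) * (ndl.length : Int)
    some (String.ofList (PySem.List.slice string.toList none (some p) ++ replace.toList ++
      PySem.List.slice string.toList (some (p + (find.toList.length : Int))) none))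

-- ===== PRECONDITION & SPEC =====
-- Pre_ excludes only the empty `find`: there A diverges whenever n ≤ 0, and for n ≥ 1 its
-- cursor never advances so it always inserts at position 0 — a degenerate corner on which
-- B's split('') naturally raises ValueError.
def Pre_replace_nth_occurence (find : String) (replace : String) (string : String) (n : Int) (match_case : Bool) : Prop := find ≠ ""
instance (find : String) (replace : String) (string : String) (n : Int) (match_case : Bool) : Decidable (Pre_replace_nth_occurence find replace string n match_case) := by unfold Pre_replace_nth_occurence; infer_instance
def pvWitness_replace_nth_occurence : String × String × String × Int × Bool := ("ab", "X", "cabab", 2, true)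

def Spec_replace_nth_occurence (find : String) (replace : String) (string : String) (n : Int) (match_case : Bool) (out : Option String) : Prop := out = replace_nth_occurence_alt find replace string n match_case
instance (find : String) (replace : String) (string : String) (n : Int) (match_case : Bool) (out : Option String) : Decidable (Spec_replace_nth_occurence find replace string n match_case out) := by unfold Spec_replace_nth_occurence; infer_instance

-- ===== CLAIM (what is proved, stated in full; the proofs are below) =====
def Claim_equal_replace_nth_occurence : Prop := ∀ (find : String) (replace : String) (string : String) (n : Int) (match_case : Bool), Dom_replace_nth_occurence find replace string n match_case → Pre_replace_nth_occurence find replace string n match_case → Spec_replace_nth_occurence find replace string n match_case (replace_nth_occurence find replace string n match_case)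

-- ===== LEMMAS AND PROOFS =====

-- A's match test at a nonnegative position j succeeds iff the (lowered, when mc = false)
-- needle is a prefix of the (lowered) haystack dropped at j.
theorem pv_match_iff (mc : Bool) (f s : List Char) (j : Nat) :
    ((if mc then
        decide (PySem.List.slice s (some (j : Int)) (some ((j : Int) + (f.length : Int))) = f)
      else
        decide (PySem.Chars.lower (PySem.List.slice s (some (j : Int)) (some ((j : Int) + (f.length : Int)))) = PySem.Chars.lower f)) = true)
    ↔ (if mc then f else PySem.Chars.lower f) <+: (if mc then s else PySem.Chars.lower s).drop j := by
  have hs : PySem.List.slice s (some (j : Int)) (some ((j : Int) + (f.length : Int)))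
      = List.take f.length (List.drop j s) := by
    rw [PySem.List.slice_toNat s (by positivity) (by positivity)]
    congr 1
    omega
  cases mc with
  | true =>
    simp only [if_true, hs, decide_eq_true_iff]
    rw [List.prefix_iff_eq_take, eq_comm]
  | false =>
    simp only [Bool.false_eq_true, if_false, hs, decide_eq_true_iff, PySem.Chars.lower,
      List.map_take, List.map_drop]
    rw [List.prefix_iff_eq_take, eq_comm, List.length_map]

-- splitOn.go never returns an empty parts list.
theorem pv_go_ne_nil (nd : List Char) :
    ∀ (fuel : Nat) (l cur : List Char) (acc : List (List Char)),
    PySem.Chars.splitOn.go nd fuel l cur acc ≠ [] := by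
  intro fuel
  induction fuel with
  | zero => intro l cur acc; rw [PySem.Chars.splitOn.go.eq_def]; simp
  | succ fuel ih =>
    intro l cur acc
    rw [PySem.Chars.splitOn.go.eq_def]
    cases l with
    | nil => simp
    | cons c rest =>
      simp only []
      split
      · exact ih _ _ _
      · exact ih _ _ _

-- On an empty remainder splitOn.go ignores the fuel.
theorem pv_go_nil (nd : List Char) (fuel : Nat) (cur : List Char) (acc : List (List Char)) :
    PySem.Chars.splitOn.go nd fuel [] cur acc = (cur.reverse :: acc).reverse := by
  cases fuel with
  | zero => rw [PySem.Chars.splitOn.go.eq_def]; simp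
  | succ fuel => rw [PySem.Chars.splitOn.go.eq_def]

-- The accumulator and current-part arguments of splitOn.go factor out.
theorem pv_go_shift (nd : List Char) :
    ∀ (fuel : Nat) (l cur : List Char) (acc : List (List Char)),
    PySem.Chars.splitOn.go nd fuel l cur acc
      = acc.reverse ++ (PySem.Chars.splitOn.go nd fuel l [] []).modifyHead (cur.reverse ++ ·) := by
  intro fuel
  induction fuel with
  | zero =>
    intro l cur acc
    rw [PySem.Chars.splitOn.go.eq_def, PySem.Chars.splitOn.go.eq_def]
    simp
  | succ fuel ih =>
    intro l cur acc
    cases l with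
    | nil => rw [pv_go_nil, pv_go_nil]; simp
    | cons c rest =>
      rw [PySem.Chars.splitOn.go.eq_def]
      conv_rhs => rw [PySem.Chars.splitOn.go.eq_def]
      simp only []
      split
      · rw [ih (List.drop nd.length (c :: rest)) [] (cur.reverse :: acc),
            ih (List.drop nd.length (c :: rest)) [] (List.reverse [] :: [])]
        cases PySem.Chars.splitOn.go nd fuel (List.drop nd.length (c :: rest)) [] [] with
        | nil => simp
        | cons q qs => simp
      · rw [ih rest (c :: cur) acc, ih rest [c] []]
        cases PySem.Chars.splitOn.go nd fuel rest [] [] with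
        | nil => simp
        | cons q qs => simp

-- splitOn.go ignores surplus fuel (needle nonempty).
theorem pv_go_fuel (nd : List Char) (hnd : nd ≠ []) :
    ∀ (f1 : Nat) (f2 : Nat) (l cur : List Char) (acc : List (List Char)),
    l.length ≤ f1 → l.length ≤ f2 →
    PySem.Chars.splitOn.go nd f1 l cur acc = PySem.Chars.splitOn.go nd f2 l cur acc := by
  intro f1
  induction f1 with
  | zero =>
    intro f2 l cur acc h1 _
    have : l = [] := by
      cases l with
      | nil => rfl
      | cons c rest => simp at h1
    subst this
    rw [pv_go_nil, pv_go_nil]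
  | succ f1 ih =>
    intro f2 l cur acc h1 h2
    cases l with
    | nil => rw [pv_go_nil, pv_go_nil]
    | cons c rest =>
      cases f2 with
      | zero => simp at h2
      | succ f2 =>
        rw [PySem.Chars.splitOn.go.eq_def]
        conv_rhs => rw [PySem.Chars.splitOn.go.eq_def]
        simp only []
        have hnd1 : 1 ≤ nd.length := List.length_pos_iff.mpr hnd
        simp only [List.length_cons] at h1 h2
        split
        · apply ih
          · simp only [List.length_drop, List.length_cons]; omega
          · simp only [List.length_drop, List.length_cons]; omega
        · apply ih
          · omega
          · omega

theorem pv_splitOn_nil (nd : List Char) : PySem.Chars.splitOn [] nd = [[]] := by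
  unfold PySem.Chars.splitOn
  rw [pv_go_nil]
  simp

theorem pv_splitOn_ne_nil (l nd : List Char) : PySem.Chars.splitOn l nd ≠ [] := by
  unfold PySem.Chars.splitOn
  exact pv_go_ne_nil nd _ l [] []

-- A match at the front contributes an empty part and the scan jumps over the needle.
theorem pv_splitOn_pos (l nd : List Char) (hnd : nd ≠ []) (h : nd <+: l) :
    PySem.Chars.splitOn l nd = [] :: PySem.Chars.splitOn (l.drop nd.length) nd := by
  obtain ⟨c, rest, rfl⟩ : ∃ c rest, l = c :: rest := by
    cases l with
    | nil =>
      exfalso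
      exact hnd (List.prefix_nil.mp h)
    | cons c rest => exact ⟨c, rest, rfl⟩
  unfold PySem.Chars.splitOn
  rw [PySem.Chars.splitOn.go.eq_def]
  simp only [List.length_cons]
  rw [if_pos (List.isPrefixOf_iff_prefix.mpr h)]
  rw [pv_go_shift nd _ _ [] (List.reverse [] :: [])]
  have hnd1 : 1 ≤ nd.length := List.length_pos_iff.mpr hnd
  rw [pv_go_fuel nd hnd (rest.length + 1) ((List.drop nd.length (c :: rest)).length + 1)
      (List.drop nd.length (c :: rest)) [] [] (by simp only [List.length_drop, List.length_cons]; omega) (by omega)]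
  cases hq : PySem.Chars.splitOn.go nd ((List.drop nd.length (c :: rest)).length + 1) (List.drop nd.length (c :: rest)) [] [] with
  | nil => exact absurd hq (pv_go_ne_nil nd _ _ _ _)
  | cons q qs => simp

-- No match at the front: the head character moves into the first part.
theorem pv_splitOn_neg (c : Char) (rest nd : List Char) (h : ¬ nd <+: (c :: rest)) :
    PySem.Chars.splitOn (c :: rest) nd = (PySem.Chars.splitOn rest nd).modifyHead (c :: ·) := by
  unfold PySem.Chars.splitOn
  rw [PySem.Chars.splitOn.go.eq_def]
  simp only [List.length_cons]
  rw [if_neg (by rw [List.isPrefixOf_iff_prefix]; exact h)]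
  rw [pv_go_shift nd (rest.length + 1) rest [c] []]
  cases PySem.Chars.splitOn.go nd (rest.length + 1) rest [] [] with
  | nil => simp
  | cons q qs => simp

-- No occurrence at all: a single part, the whole string.
theorem pv_splitOn_no_occ (l nd : List Char) (h : ¬ nd <:+: l) :
    PySem.Chars.splitOn l nd = [l] := by
  induction l with
  | nil =>
    rw [pv_splitOn_nil]
  | cons c rest ih =>
    rw [pv_splitOn_neg c rest nd (fun hp => h hp.isInfix)]
    rw [ih (fun hi => h (List.infix_cons hi))]
    simp

-- The splice of `r` into `s` at position p (helpers for the proofs only).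
def pvSplice (s r f : List Char) (p : Nat) : Option String :=
  some (String.ofList (PySem.List.slice s none (some (p : Int)) ++ r ++
    PySem.List.slice s (some ((p : Int) + (f.length : Int))) none))

-- The common right-hand side of the main induction: what both loops compute from cursor i.
def pvRHS (f r s : List Char) (n : Int) (h nd : List Char) (i : Nat) (found : Int) : Option String :=
  if found < n ∧ n ≤ found + ((PySem.Chars.splitOn (h.drop i) nd).length : Int) - 1 then
    pvSplice s r f
      (i + (((PySem.Chars.splitOn (h.drop i) nd).take (n - found).toNat).map List.length).sum
         + ((n - found).toNat - 1) * nd.length)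
  else none

-- Main induction: A's counting scan computes pvRHS.
theorem pv_main (f r s : List Char) (n : Int) (mc : Bool) (hf : f ≠ []) :
    ∀ (m : Nat) (i : Nat) (found : Int) (kA : Nat),
    i ≤ s.length → s.length - i < m → s.length + 1 ≤ kA + i →
    pvA_loop f r s n mc kA (i : Int) found
      = pvRHS f r s n (if mc then s else PySem.Chars.lower s) (if mc then f else PySem.Chars.lower f) i found := by
  have hflen : 1 ≤ f.length := List.length_pos_iff.mpr hf
  have hhay : (if mc then s else PySem.Chars.lower s).length = s.length := by
    cases mc <;> simp [PySem.Chars.lower]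
  have hndl : (if mc then f else PySem.Chars.lower f).length = f.length := by
    cases mc <;> simp [PySem.Chars.lower]
  have hne : (if mc then f else PySem.Chars.lower f) ≠ [] := by
    cases mc <;> simp [PySem.Chars.lower, hf]
  set hay := (if mc then s else PySem.Chars.lower s) with hhay_def
  set nd := (if mc then f else PySem.Chars.lower f) with hnd_def
  intro m
  induction m with
  | zero => intro i found kA h1 h2 h3; omega
  | succ m ih =>
    intro i found kA hile hlt hkA
    obtain ⟨kA', rfl⟩ : ∃ k, kA = k + 1 := ⟨kA - 1, by omega⟩
    rw [pvA_loop]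
    by_cases hcond : (i : Int) < (s.length : Int) - (f.length : Int) + 1
    · rw [if_pos hcond]
      by_cases hm : nd <+: hay.drop i
      · -- match at i
        have hd : (if mc then
            decide (PySem.List.slice s (some (i : Int)) (some ((i : Int) + (f.length : Int))) = f)
          else
            decide (PySem.Chars.lower (PySem.List.slice s (some (i : Int)) (some ((i : Int) + (f.length : Int)))) = PySem.Chars.lower f)) = true := by
          rw [pv_match_iff]; exact hm
        simp only [hd, if_true]
        have hsplit : PySem.Chars.splitOn (hay.drop i) nd
            = [] :: PySem.Chars.splitOn (hay.drop (i + nd.length)) nd := by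
          rw [pv_splitOn_pos (hay.drop i) nd hne hm, List.drop_drop]
        by_cases hn : found + 1 = n
        · rw [if_pos hn]
          unfold pvRHS
          rw [hsplit]
          have hlen2 : PySem.Chars.splitOn (hay.drop (i + nd.length)) nd ≠ [] :=
            pv_splitOn_ne_nil _ _
          cases hq : PySem.Chars.splitOn (hay.drop (i + nd.length)) nd with
          | nil => exact absurd hq hlen2
          | cons q qs =>
            rw [if_pos (by simp only [List.length_cons]; push_cast; omega)]
            have hk1 : (n - found).toNat = 1 := by omega
            rw [hk1]
            unfold pvSplice
            simp
        · rw [if_neg hn]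
          have hcast : (i : Int) + (f.length : Int) = ((i + f.length : Nat) : Int) := by push_cast; ring
          rw [hcast]
          rw [ih (i + f.length) (found + 1) kA' (by omega) (by omega) (by omega)]
          rw [show i + f.length = i + nd.length from by omega]
          unfold pvRHS
          rw [hsplit]
          by_cases hc2 : found + 1 < n ∧ n ≤ found + 1 + ((PySem.Chars.splitOn (hay.drop (i + nd.length)) nd).length : Int) - 1
          · obtain ⟨hc2a, hc2b⟩ := hc2
            rw [if_pos ⟨hc2a, hc2b⟩,
                if_pos (by simp only [List.length_cons]; push_cast; constructor <;> omega)]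
            obtain ⟨k0, hk0⟩ : ∃ k0, (n - (found + 1)).toNat = k0 + 1 := ⟨(n - (found + 1)).toNat - 1, by omega⟩
            have hkeq : (n - found).toNat = (k0 + 1) + 1 := by omega
            rw [hkeq, hk0, List.take_succ_cons]
            simp only [List.map_cons, List.length_nil, List.sum_cons, Nat.zero_add,
              Nat.add_sub_cancel, Nat.succ_mul]
            congr 1
            omega
          · rw [if_neg hc2]
            rw [if_neg (by
              rintro ⟨ha, hb⟩
              simp only [List.length_cons] at hb
              push_cast at hb
              exact hc2 ⟨by omega, by omega⟩)]
      · -- no match at i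
        have hd : (if mc then
            decide (PySem.List.slice s (some (i : Int)) (some ((i : Int) + (f.length : Int))) = f)
          else
            decide (PySem.Chars.lower (PySem.List.slice s (some (i : Int)) (some ((i : Int) + (f.length : Int)))) = PySem.Chars.lower f)) = false := by
          rw [← Bool.not_eq_true, pv_match_iff]; exact hm
        simp only [hd, Bool.false_eq_true, if_false]
        have hilt : i < hay.length := by omega
        have hdropc : hay.drop i = hay[i] :: hay.drop (i + 1) := List.drop_eq_getElem_cons hilt
        have hsplit : PySem.Chars.splitOn (hay.drop i) nd
            = (PySem.Chars.splitOn (hay.drop (i + 1)) nd).modifyHead (hay[i] :: ·) := by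
          rw [hdropc, pv_splitOn_neg hay[i] (hay.drop (i + 1)) nd (by rw [← hdropc]; exact hm)]
        have hcast : (i : Int) + 1 = ((i + 1 : Nat) : Int) := by push_cast; ring
        rw [hcast]
        rw [ih (i + 1) found kA' (by omega) (by omega) (by omega)]
        unfold pvRHS
        rw [hsplit]
        cases hq : PySem.Chars.splitOn (hay.drop (i + 1)) nd with
        | nil => exact absurd hq (pv_splitOn_ne_nil _ _)
        | cons q qs =>
          simp only [List.modifyHead_cons, List.length_cons]
          by_cases hc2 : found < n ∧ n ≤ found + ((qs.length + 1 : Nat) : Int) - 1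
          · obtain ⟨hc2a, hc2b⟩ := hc2
            rw [if_pos (by push_cast; constructor <;> omega),
                if_pos (by push_cast; constructor <;> omega)]
            obtain ⟨k', hk'⟩ : ∃ k', (n - found).toNat = k' + 1 := ⟨(n - found).toNat - 1, by omega⟩
            rw [hk', List.take_succ_cons, List.take_succ_cons]
            simp only [List.map_cons, List.sum_cons, List.length_cons, Nat.add_sub_cancel]
            congr 1
            omega
          · rw [if_neg (by
              rintro ⟨ha, hb⟩
              push_cast at hb
              exact hc2 ⟨ha, by push_cast; omega⟩)]
            rw [if_neg (by
              rintro ⟨ha, hb⟩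
              push_cast at hb
              exact hc2 ⟨ha, by push_cast; omega⟩)]
    · rw [if_neg hcond]
      unfold pvRHS
      have hnocc : ¬ nd <:+: hay.drop i := by
        intro hocc
        have := hocc.length_le
        rw [List.length_drop] at this
        omega
      rw [pv_splitOn_no_occ _ _ hnocc]
      rw [if_neg (by simp only [List.length_cons, List.length_nil]; push_cast; omega)]

-- Casting the sum of part lengths.
theorem pv_sum_cast (L : List (List Char)) :
    (L.map (fun q => (q.length : Int))).sum = ((L.map List.length).sum : Int) := by
  induction L with
  | nil => simp
  | cons q qs ih => simp [ih]

-- ===== VERDICT (by name: the statement is the Claim_ definition above) =====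
theorem replace_nth_occurence_spec : Claim_equal_replace_nth_occurence := by
  intro find replace string n match_case _ hpre
  unfold Spec_replace_nth_occurence
  have hf : find.toList ≠ [] := by
    intro h
    apply hpre
    have := congrArg String.ofList h
    simpa using this
  have hmain := pv_main find.toList replace.toList string.toList n match_case hf
    (string.toList.length + 1) 0 0 (string.toList.length + n.toNat + 1)
    (by omega) (by omega) (by omega)
  simp only [Nat.cast_zero] at hmain
  unfold replace_nth_occurence
  rw [hmain]
  simp only [replace_nth_occurence_alt]
  unfold pvRHS pvSplice
  simp only [List.drop_zero]
  set hay := (if match_case = true then string.toList else PySem.Chars.lower string.toList) with hhay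
  set nd := (if match_case = true then find.toList else PySem.Chars.lower find.toList) with hnd
  set parts := PySem.Chars.splitOn hay nd with hparts
  by_cases hc : (0 : Int) < n ∧ n ≤ 0 + (parts.length : Int) - 1
  · rw [if_pos hc, if_neg (by omega)]
    have hslice : PySem.List.slice parts none (some n) = parts.take n.toNat :=
      PySem.List.slice_to parts (by omega)
    rw [hslice, pv_sum_cast]
    have hk : (n - 0).toNat = n.toNat := by omega
    rw [hk]
    have hcast : (((parts.take n.toNat).map List.length).sum : Int) + (n - 1) * (nd.length : Int)
        = ((0 + ((parts.take n.toNat).map List.length).sum + (n.toNat - 1) * nd.length : Nat) : Int) := by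
      obtain ⟨k0, hk0⟩ : ∃ k0, n.toNat = k0 + 1 := ⟨n.toNat - 1, by omega⟩
      have h1 : (n : Int) - 1 = (k0 : Int) := by omega
      rw [hk0, h1, Nat.add_sub_cancel]
      push_cast
      ring
    rw [hcast]
  · rw [if_neg hc, if_pos (by omega)]
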